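-- pv_equiv track=rewrite | github.com/Bosheng-BA/QPPTW | QPPTW.py | Readjustment_time_windows0
-- ===== SOURCE A (Python) =====
-- def Readjustment_time_windows0(graph, weights, time_windows, path):
--     updated_time_windows = time_windows.copy()
--
--     for i, label in enumerate(path):
--         if i == len(path) - 1:
--             break
--         edge = (label[0], path[i + 1][0])
--
--         (edge_start, edge_end) = label[1]
--         j = 0
--         while j < len(updated_time_windows[edge]):
--             (window_start, window_end) = updated_time_windows[edge][j]
--
--             if edge_end <= window_start:
--                 break
--             if edge_start <= window_end:
--                 if edge_start < window_start + weights[edge]: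
--                     if window_end - weights[edge] < edge_end:
--                         updated_time_windows[edge].pop(j)
--                         continue
--                     else:
--                         updated_time_windows[edge][j] = (edge_end, window_end)
--                 else:
--                     if window_end - weights[edge] < edge_end:
--                         updated_time_windows[edge].pop(j)
--                         updated_time_windows[edge].insert(j, (window_start, edge_start))
--                     else:
--                         updated_time_windows[edge][j] = (window_start, edge_start)
--                         updated_time_windows[edge].insert(j + 1, (edge_end, window_end))
--                         j += 1
--             j += 1
--     return updated_time_windows
-- ===== SOURCE B (Python) =====
-- def Readjustment_time_windows0(graph, weights, time_windows, path):
--     updated_time_windows = time_windows.copy()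
--
--     for label, nxt in zip(path, path[1:]):
--         edge = (label[0], nxt[0])
--         (edge_start, edge_end) = label[1]
--         old = updated_time_windows[edge]
--         new = []
--         tail_start = len(old)
--         for idx, (window_start, window_end) in enumerate(old):
--             if edge_end <= window_start:
--                 tail_start = idx
--                 break
--             if edge_start <= window_end:
--                 # weights[edge] is read lazily, exactly where A reads it
--                 w = weights[edge]
--                 if window_start + w <= edge_start:
--                     new.append((window_start, edge_start))
--                 if edge_end <= window_end - w:
--                     new.append((edge_end, window_end))
--             else:
--                 new.append((window_start, window_end))
--         # in-place slice write: keep the same (shared) list object mutated, like A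
--         old[:] = new + old[tail_start:]
--     return updated_time_windows
-- ===== Notes on version B (the rewrite author's own statement) =====
-- stated objective: simpler
-- what changed: Per edge, B trims the window list in one forward rebuild pass emitting 0/1/2 intervals per window (written back with a slice assignment), instead of A's in-place surgery with a moving index j, pop, insert and overwrite; B reads weights[edge] lazily exactly where A does, so it returns/raises identically to A on every input.
import Mathlib
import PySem

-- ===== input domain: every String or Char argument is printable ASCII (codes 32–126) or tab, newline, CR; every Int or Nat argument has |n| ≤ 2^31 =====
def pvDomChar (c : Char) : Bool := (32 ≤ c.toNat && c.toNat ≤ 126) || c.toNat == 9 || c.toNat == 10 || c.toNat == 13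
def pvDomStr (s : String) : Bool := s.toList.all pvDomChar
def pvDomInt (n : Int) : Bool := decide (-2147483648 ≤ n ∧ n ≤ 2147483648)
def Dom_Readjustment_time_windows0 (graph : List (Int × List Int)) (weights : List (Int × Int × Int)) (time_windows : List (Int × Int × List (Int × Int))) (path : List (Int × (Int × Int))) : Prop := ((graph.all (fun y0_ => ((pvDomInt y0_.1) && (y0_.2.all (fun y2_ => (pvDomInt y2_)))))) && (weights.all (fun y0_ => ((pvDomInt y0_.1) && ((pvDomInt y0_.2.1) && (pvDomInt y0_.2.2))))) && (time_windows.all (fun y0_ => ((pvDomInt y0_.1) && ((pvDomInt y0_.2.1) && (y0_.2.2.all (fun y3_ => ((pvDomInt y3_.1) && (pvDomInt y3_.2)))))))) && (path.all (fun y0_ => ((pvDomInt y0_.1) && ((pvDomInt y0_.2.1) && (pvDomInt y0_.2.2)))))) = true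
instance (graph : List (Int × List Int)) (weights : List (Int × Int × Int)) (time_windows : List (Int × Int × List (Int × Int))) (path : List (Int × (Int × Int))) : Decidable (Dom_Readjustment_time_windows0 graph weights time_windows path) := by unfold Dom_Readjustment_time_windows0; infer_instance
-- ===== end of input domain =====

-- B rebuilds each edge's trimmed window list in one forward pass instead of A's in-place index
-- surgery (pop/insert/overwrite with a moving index j); return value proved equal. Both the Python
-- A and the Python B mutate the inner window lists of `time_windows` in place (shallow copy);
-- the theorems here are about the RETURN value only.

-- ===== PORT A =====
-- shared dict helpers for the (u,v)-keyed dicts `weights` and `time_windows`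
-- (first match; Pre_ makes keys distinct and present, matching the Python dicts)
def lookupW (weights : List (Int × Int × Int)) (u v : Int) : Int :=
  match weights with
  | [] => 0
  | (a, b, w) :: rest => if a = u ∧ b = v then w else lookupW rest u v

def lookupTW (tw : List (Int × Int × List (Int × Int))) (u v : Int) : List (Int × Int) :=
  match tw with
  | [] => []
  | (a, b, ws) :: rest => if a = u ∧ b = v then ws else lookupTW rest u v

def setTW (tw : List (Int × Int × List (Int × Int))) (u v : Int) (ws : List (Int × Int)) :
    List (Int × Int × List (Int × Int)) :=
  match tw with
  | [] => []
  | (a, b, ws0) :: rest =>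
      if a = u ∧ b = v then (a, b, ws) :: rest else (a, b, ws0) :: setTW rest u v ws

-- A's inner while loop: index j into the list being mutated by pop/insert/assignment
def loopA (eS eE w : Int) (ws : List (Int × Int)) (j : Nat) : List (Int × Int) :=
  if h : j < ws.length then
    let p := ws[j]
    if eE ≤ p.1 then ws
    else if eS ≤ p.2 then
      if eS < p.1 + w then
        if p.2 - w < eE then loopA eS eE w (ws.eraseIdx j) j
        else loopA eS eE w (ws.set j (eE, p.2)) (j + 1)
      else
        if p.2 - w < eE then loopA eS eE w (((ws.eraseIdx j).insertIdx j (p.1, eS))) (j + 1)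
        else loopA eS eE w (((ws.set j (p.1, eS)).insertIdx (j + 1) (eE, p.2))) (j + 2)
    else loopA eS eE w ws (j + 1)
  else ws
termination_by ws.length - j
decreasing_by
  all_goals
    first
      | omega
      | (simp [List.length_eraseIdx, List.length_insertIdx]
         first
           | omega
           | (split_ifs <;> omega))

-- A's outer for loop over path (break at the last label)
def outerA (weights : List (Int × Int × Int)) (st : List (Int × Int × List (Int × Int))) :
    List (Int × (Int × Int)) → List (Int × Int × List (Int × Int))
  | [] => st
  | [_] => st
  | (u, eS, eE) :: (v, lab2) :: rest =>
      let ws' := loopA eS eE (lookupW weights u v) (lookupTW st u v) 0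
      outerA weights (setTW st u v ws') ((v, lab2) :: rest)

def Readjustment_time_windows0 (graph : List (Int × List Int)) (weights : List (Int × Int × Int)) (time_windows : List (Int × Int × List (Int × Int))) (path : List (Int × (Int × Int))) : List (Int × Int × List (Int × Int)) :=
  outerA weights time_windows path

-- ===== PORT B =====
-- B's single forward pass: emit 0/1/2 trimmed intervals per window (the weight is looked up
-- inside the overlap branch, where Source B reads weights[edge]), stop at the first window entirely
-- to the right of the edge interval and keep the rest unchanged
def trimB (eS eE : Int) (weights : List (Int × Int × Int)) (u v : Int) :
    List (Int × Int) → List (Int × Int)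
  | [] => []
  | (wS, wE) :: rest =>
      if eE ≤ wS then (wS, wE) :: rest
      else if eS ≤ wE then
        let w := lookupW weights u v
        (if wS + w ≤ eS then [(wS, eS)] else []) ++
        (if eE ≤ wE - w then [(eE, wE)] else []) ++ trimB eS eE weights u v rest
      else (wS, wE) :: trimB eS eE weights u v rest

def Readjustment_time_windows0_alt (graph : List (Int × List Int)) (weights : List (Int × Int × Int)) (time_windows : List (Int × Int × List (Int × Int))) (path : List (Int × (Int × Int))) : List (Int × Int × List (Int × Int)) :=
  (path.zip path.tail).foldl
    (fun st (lab, nxt) =>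
      setTW st lab.1 nxt.1
        (trimB lab.2.1 lab.2.2 weights lab.1 nxt.1 (lookupTW st lab.1 nxt.1)))
    time_windows

-- ===== PRECONDITION & SPEC =====
-- Pre_ = the Python dicts are well formed (distinct keys) and every consecutive edge of the path
-- is a key of both `time_windows` and `weights`: the closed-form guarantee that neither program
-- raises KeyError. B reads weights[edge] lazily exactly where A does, so B returns/raises
-- identically to A even on the excluded inputs (Pre_ is merely a sufficient no-crash condition).
def Pre_Readjustment_time_windows0 (graph : List (Int × List Int)) (weights : List (Int × Int × Int)) (time_windows : List (Int × Int × List (Int × Int))) (path : List (Int × (Int × Int))) : Prop :=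
  (time_windows.map (fun t => (t.1, t.2.1))).Nodup ∧
  (weights.map (fun t => (t.1, t.2.1))).Nodup ∧
  ∀ p ∈ path.zip path.tail,
    ((p.1.1, p.2.1) ∈ time_windows.map (fun t => (t.1, t.2.1)) ∧
     (p.1.1, p.2.1) ∈ weights.map (fun t => (t.1, t.2.1)))
instance (graph : List (Int × List Int)) (weights : List (Int × Int × Int)) (time_windows : List (Int × Int × List (Int × Int))) (path : List (Int × (Int × Int))) : Decidable (Pre_Readjustment_time_windows0 graph weights time_windows path) := by unfold Pre_Readjustment_time_windows0; infer_instance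

def pvWitness_Readjustment_time_windows0 : (List (Int × List Int)) × (List (Int × Int × Int)) × (List (Int × Int × List (Int × Int))) × (List (Int × (Int × Int))) :=
  ([], [(0, 1, 2)], [(0, 1, [(0, 10)])], [(0, (1, 3)), (1, (0, 0))])

def Spec_Readjustment_time_windows0 (graph : List (Int × List Int)) (weights : List (Int × Int × Int)) (time_windows : List (Int × Int × List (Int × Int))) (path : List (Int × (Int × Int))) (out : List (Int × Int × List (Int × Int))) : Prop := out = Readjustment_time_windows0_alt graph weights time_windows path
instance (graph : List (Int × List Int)) (weights : List (Int × Int × Int)) (time_windows : List (Int × Int × List (Int × Int))) (path : List (Int × (Int × Int))) (out : List (Int × Int × List (Int × Int))) : Decidable (Spec_Readjustment_time_windows0 graph weights time_windows path out) := by unfold Spec_Readjustment_time_windows0; infer_instance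

-- ===== CLAIM (what is proved, stated in full; the proofs are below) =====
def Claim_equal_Readjustment_time_windows0 : Prop := ∀ (graph : List (Int × List Int)) (weights : List (Int × Int × Int)) (time_windows : List (Int × Int × List (Int × Int))) (path : List (Int × (Int × Int))), Dom_Readjustment_time_windows0 graph weights time_windows path → Pre_Readjustment_time_windows0 graph weights time_windows path → Spec_Readjustment_time_windows0 graph weights time_windows path (Readjustment_time_windows0 graph weights time_windows path)

-- ===== LEMMAS AND PROOFS =====

-- trimB with the (constant) weight abstracted, the induction target of the loop lemma
def trimBw (eS eE w : Int) : List (Int × Int) → List (Int × Int)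
  | [] => []
  | (wS, wE) :: rest =>
      if eE ≤ wS then (wS, wE) :: rest
      else if eS ≤ wE then
        (if wS + w ≤ eS then [(wS, eS)] else []) ++
        (if eE ≤ wE - w then [(eE, wE)] else []) ++ trimBw eS eE w rest
      else (wS, wE) :: trimBw eS eE w rest

theorem trimB_eq_trimBw (eS eE : Int) (weights : List (Int × Int × Int)) (u v : Int)
    (l : List (Int × Int)) : trimB eS eE weights u v l = trimBw eS eE (lookupW weights u v) l := by
  induction l with
  | nil => rfl
  | cons hd tl ih => obtain ⟨wS, wE⟩ := hd; simp [trimB, trimBw, ih]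

theorem eraseIdx_at {α : Type} (pre : List α) (x : α) (rest : List α) :
    (pre ++ x :: rest).eraseIdx pre.length = pre ++ rest := by
  induction pre with
  | nil => rfl
  | cons a t ih => simp [ih]

theorem set_at {α : Type} (pre : List α) (x y : α) (rest : List α) :
    (pre ++ x :: rest).set pre.length y = pre ++ y :: rest := by
  induction pre with
  | nil => simp
  | cons a t ih => simp [ih]

theorem insert_at {α : Type} (pre : List α) (y : α) (rest : List α) :
    (pre ++ rest).insertIdx pre.length y = pre ++ y :: rest := by
  induction pre with
  | nil => simp
  | cons a t ih =>
      simp only [List.insertIdx] at ih ⊢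
      simp [ih]

theorem get_at {α : Type} [Inhabited α] (pre : List α) (x : α) (rest : List α)
    (h : pre.length < (pre ++ x :: rest).length) : (pre ++ x :: rest)[pre.length] = x := by
  rw [List.getElem_append_right (Nat.le_refl _)]
  simp

-- A's index-surgery loop started at j = pre.length leaves pre alone and computes trimBw on the rest
theorem loopA_eq_trimBw (eS eE w : Int) (suf pre : List (Int × Int)) :
    loopA eS eE w (pre ++ suf) pre.length = pre ++ trimBw eS eE w suf := by
  induction suf generalizing pre with
  | nil => rw [loopA]; simp [trimBw]
  | cons hd tl ih =>
    obtain ⟨wS, wE⟩ := hd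
    rw [loopA]
    have hlt : pre.length < (pre ++ (wS, wE) :: tl).length := by simp
    rw [dif_pos hlt]
    simp only [get_at pre (wS, wE) tl hlt]
    by_cases h1 : eE ≤ wS
    · simp [h1, trimBw]
    · by_cases h2 : eS ≤ wE
      · by_cases h3 : eS < wS + w
        · by_cases h4 : wE - w < eE
          · have c1 : ¬ (wS + w ≤ eS) := by omega
            have c2 : ¬ (eE ≤ wE - w) := by omega
            simp only [if_neg h1, if_pos h2, if_pos h3, if_pos h4]
            rw [eraseIdx_at, ih pre]
            simp [trimBw, h1, h2, c1, c2]
          · have c1 : ¬ (wS + w ≤ eS) := by omega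
            have c2 : eE ≤ wE - w := by omega
            simp only [if_neg h1, if_pos h2, if_pos h3, if_neg h4]
            rw [set_at]
            have h5 := ih (pre ++ [(eE, wE)])
            simp at h5
            rw [h5]
            simp [trimBw, h1, h2, c1, c2]
        · by_cases h4 : wE - w < eE
          · have c1 : wS + w ≤ eS := by omega
            have c2 : ¬ (eE ≤ wE - w) := by omega
            simp only [if_neg h1, if_pos h2, if_neg h3, if_pos h4]
            rw [eraseIdx_at, insert_at]
            have h5 := ih (pre ++ [(wS, eS)])
            simp at h5
            rw [h5]
            simp [trimBw, h1, h2, c1, c2]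
          · have c1 : wS + w ≤ eS := by omega
            have c2 : eE ≤ wE - w := by omega
            simp only [if_neg h1, if_pos h2, if_neg h3, if_neg h4]
            rw [set_at,
              show (pre ++ (wS, eS) :: tl : List (Int × Int)) = (pre ++ [(wS, eS)]) ++ tl
                by simp,
              show pre.length + 1 = (pre ++ [(wS, eS)]).length by simp,
              insert_at]
            have h5 := ih (pre ++ [(wS, eS), (eE, wE)])
            simp at h5
            simp only [List.append_assoc, List.cons_append, List.nil_append]
            rw [h5]
            simp [trimBw, h1, h2, c1, c2]
      · simp only [if_neg h1, if_neg h2]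
        have h5 := ih (pre ++ [(wS, wE)])
        simp at h5
        rw [h5]
        simp [trimBw, h1, h2]

theorem outerA_eq_foldl (weights : List (Int × Int × Int))
    (st : List (Int × Int × List (Int × Int))) (path : List (Int × (Int × Int))) :
    outerA weights st path =
      (path.zip path.tail).foldl
        (fun st x =>
          setTW st x.1.1 x.2.1
            (trimB x.1.2.1 x.1.2.2 weights x.1.1 x.2.1 (lookupTW st x.1.1 x.2.1)))
        st := by
  induction path generalizing st with
  | nil => simp [outerA]
  | cons a rest ih =>
    cases rest with
    | nil => simp [outerA]
    | cons b rest' =>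
      obtain ⟨u, eS, eE⟩ := a
      simp only [outerA, List.tail_cons, List.zip_cons_cons, List.foldl_cons]
      rw [ih]
      have := loopA_eq_trimBw eS eE (lookupW weights u b.1) (lookupTW st u b.1) []
      simp only [List.nil_append, List.length_nil] at this
      rw [this, ← trimB_eq_trimBw]
      simp

-- ===== VERDICT (by name: the statement is the Claim_ definition above) =====
theorem Readjustment_time_windows0_spec : Claim_equal_Readjustment_time_windows0 := by
  intro graph weights time_windows path _ _
  unfold Spec_Readjustment_time_windows0 Readjustment_time_windows0 Readjustment_time_windows0_alt
  exact outerA_eq_foldl weights time_windows path
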